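-- pv_equiv track=rewrite | github.com/Alset-Nikolas/TacyProject | tacy_app/media/files/project/ц/second.py | sleight_hand
-- ===== SOURCE A (Python) =====
-- def sleight_hand(k, table):
--     data = dict()
--     max_el = 0
--     for line in table:
--         for el in line:
--             if el.isdigit():
--                 el = int(el)
--                 if el not in data:
--                     data[el] = 0
--                 data[el] += 1
--                 if el > max_el:
--                     max_el = el
--     res = 0
--     for t in range(1, max_el + 1):
--         if t in data and data[t] <= k:
--             res += 1
--     return res
-- ===== SOURCE B (Python) =====
-- def sleight_hand(k, table):
--     # collect every digit char's value, sort, then one sweep over adjacent runs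
--     vals = sorted(int(el) for line in table for el in line if el.isdigit())
--     n = len(vals)
--
--     def go(i):
--         if i == n:
--             return 0
--         j = i
--         while j < n and vals[j] == vals[i]:
--             j += 1
--         return (1 if vals[i] >= 1 and j - i <= k else 0) + go(j)
--
--     return go(0)
-- ===== Notes on version B (the rewrite author's own statement) =====
-- stated objective: alternative
-- what changed: Replaces A's dict-based frequency counting plus a scan over range(1, max_el+1) with collecting all digit values into one flat list, sorting it, and a single run-length sweep over adjacent equal groups (count a group iff its value >= 1 and its run length <= k).
import Mathlib
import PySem

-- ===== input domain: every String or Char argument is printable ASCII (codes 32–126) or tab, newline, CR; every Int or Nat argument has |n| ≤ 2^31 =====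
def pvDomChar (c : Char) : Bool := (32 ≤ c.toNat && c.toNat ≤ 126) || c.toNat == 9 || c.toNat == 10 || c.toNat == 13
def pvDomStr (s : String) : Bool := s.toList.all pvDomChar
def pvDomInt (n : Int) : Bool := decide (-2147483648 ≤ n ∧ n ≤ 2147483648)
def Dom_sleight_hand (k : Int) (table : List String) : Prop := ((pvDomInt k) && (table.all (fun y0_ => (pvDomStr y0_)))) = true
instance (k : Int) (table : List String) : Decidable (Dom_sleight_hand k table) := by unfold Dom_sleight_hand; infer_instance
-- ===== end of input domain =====

-- ===== PORT A =====
-- B replaces A's dict of counts + range scan by sort-and-sweep over runs; return values agree on all inputs.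
-- A-side helper: the body of A's inner character loop; int(el) on a single ASCII digit char is its code minus 48 (exact on Dom).
def aStep (st : PySem.Dict Int Int × Int) (el : Char) : PySem.Dict Int Int × Int :=
  if PySem.Chars.isdigit el then
    let v : Int := (el.toNat : Int) - 48
    let data := if (st.1.get? v).isSome then st.1 else st.1.insert v 0
    let data := data.insert v (data.getD v 0 + 1)
    (data, if v > st.2 then v else st.2)
  else st

def sleight_hand (k : Int) (table : List String) : Int :=
  let st := table.foldl (fun st line => line.toList.foldl aStep st)
              ((PySem.Dict.empty : PySem.Dict Int Int), (0 : Int))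
  (PySem.List.pyRange 1 (st.2 + 1)).foldl
    (fun res t => if st.1.contains t ∧ st.1.getD t 0 ≤ k then res + 1 else res) 0

-- ===== PORT B =====
-- B-side helper: the recursive sweep 'go'; the inner while loop (advance j over the run of vals[i])
-- is the takeWhile/dropWhile split of the remaining list.
def bGroup (k : Int) : List Int → Int
  | [] => 0
  | x :: xs =>
    (if 1 ≤ x ∧ ((xs.takeWhile (fun y => y == x)).length : Int) + 1 ≤ k then 1 else 0)
      + bGroup k (xs.dropWhile (fun y => y == x))
termination_by l => l.length
decreasing_by simpa using Nat.lt_succ_of_le (List.length_dropWhile_le _ _)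

def sleight_hand_alt (k : Int) (table : List String) : Int :=
  let vals := PySem.List.sorted
    (table.flatMap (fun line => (line.toList.filter PySem.Chars.isdigit).map
      (fun c => (c.toNat : Int) - 48))) (fun x => x) false
  bGroup k vals

-- ===== PRECONDITION & SPEC =====
def Spec_sleight_hand (k : Int) (table : List String) (out : Int) : Prop := out = sleight_hand_alt k table
instance (k : Int) (table : List String) (out : Int) : Decidable (Spec_sleight_hand k table out) := by unfold Spec_sleight_hand; infer_instance

-- ===== CLAIM (what is proved, stated in full; the proofs are below) =====
def Claim_equal_sleight_hand : Prop := ∀ (k : Int) (table : List String), Dom_sleight_hand k table → Spec_sleight_hand k table (sleight_hand k table)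

-- ===== LEMMAS AND PROOFS =====

-- the flat list of digit values of the table
def digitsOf (table : List String) : List Int :=
  table.flatMap (fun line => (line.toList.filter PySem.Chars.isdigit).map
    (fun c => (c.toNat : Int) - 48))

-- the common quantity: number of distinct values v of M with 1 <= v and multiplicity <= k
def cardSat (M : List Int) (k : Int) : Nat :=
  (M.toFinset.filter (fun v => 1 ≤ v ∧ (M.count v : Int) ≤ k)).card

-- A's inner loop, restricted to the digit characters' values
def gStep (st : PySem.Dict Int Int × Int) (v : Int) : PySem.Dict Int Int × Int :=
  (let data := if (st.1.get? v).isSome then st.1 else st.1.insert v 0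
   data.insert v (data.getD v 0 + 1), if v > st.2 then v else st.2)

lemma foldl_aStep_filter (cs : List Char) (s0 : PySem.Dict Int Int × Int) :
    cs.foldl aStep s0
      = ((cs.filter PySem.Chars.isdigit).map (fun c => (c.toNat : Int) - 48)).foldl gStep s0 := by
  induction cs generalizing s0 with
  | nil => rfl
  | cons c t ih =>
    by_cases h : PySem.Chars.isdigit c
    · simp [h, aStep, gStep, ih]
    · simp [h, aStep, ih]

lemma foldl_table (table : List String) (s0 : PySem.Dict Int Int × Int) :
    table.foldl (fun st line => line.toList.foldl aStep st) s0
      = (digitsOf table).foldl gStep s0 := by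
  induction table generalizing s0 with
  | nil => rfl
  | cons l t ih =>
    have hd : digitsOf (l :: t)
        = ((l.toList.filter PySem.Chars.isdigit).map (fun c => (c.toNat : Int) - 48))
            ++ digitsOf t := by
      simp [digitsOf]
    rw [List.foldl_cons, hd, List.foldl_append, ← foldl_aStep_filter, ih]

lemma gStep_getD (st : PySem.Dict Int Int × Int) (v w : Int) :
    (gStep st v).1.getD w 0 = if w = v then st.1.getD v 0 + 1 else st.1.getD w 0 := by
  unfold gStep
  by_cases h : (st.1.get? v).isSome
  · simp [h, PySem.Dict.getD_insert]
  · have hn : st.1.get? v = none := by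
      cases hh : st.1.get? v
      · rfl
      · simp [hh] at h
    have h0 : st.1.getD v 0 = 0 := PySem.Dict.getD_of_get?_eq_none _ _ hn
    simp [h, PySem.Dict.getD_insert, h0]
    split_ifs <;> simp

lemma gStep_contains (st : PySem.Dict Int Int × Int) (v w : Int) :
    (gStep st v).1.contains w = ((w == v) || st.1.contains w) := by
  unfold gStep
  by_cases h : (st.1.get? v).isSome
  · simp [h, PySem.Dict.contains_insert]
  · simp [h, PySem.Dict.contains_insert, Bool.or_self_left]

lemma foldl_gStep_inv (M : List Int) (d : PySem.Dict Int Int) (m : Int) :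
    (∀ v, (M.foldl gStep (d, m)).1.getD v 0 = d.getD v 0 + M.count v)
    ∧ (∀ v, (M.foldl gStep (d, m)).1.contains v = (d.contains v || decide (v ∈ M)))
    ∧ (M.foldl gStep (d, m)).2 = M.foldl (fun a v => if v > a then v else a) m := by
  induction M generalizing d m with
  | nil => exact ⟨fun v => by simp, fun v => by simp, rfl⟩
  | cons x t ih =>
    obtain ⟨ih1, ih2, ih3⟩ := ih (gStep (d, m) x).1 (gStep (d, m) x).2
    refine ⟨fun v => ?_, fun v => ?_, ?_⟩
    · rw [List.foldl_cons, ← Prod.mk.eta (p := gStep (d, m) x), ih1, gStep_getD]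
      rw [List.count_cons]
      by_cases hv : v = x <;> simp [hv] <;> omega
    · rw [List.foldl_cons, ← Prod.mk.eta (p := gStep (d, m) x), ih2, gStep_contains]
      cases hc : d.contains v <;> by_cases hv : v = x <;> simp [hv, List.mem_cons]
    · have hsnd : (gStep (d, m) x).2 = if x > m then x else m := rfl
      rw [List.foldl_cons, ← Prod.mk.eta (p := gStep (d, m) x), ih3, List.foldl_cons, hsnd]

lemma foldl_maxstep_eq (M : List Int) (m : Int) :
    M.foldl (fun a v => if v > a then v else a) m = M.foldl max m := by
  induction M generalizing m with
  | nil => rfl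
  | cons x t ih =>
    have hx : (if x > m then x else m) = max m x := by
      simp only [max_def]
      split_ifs <;> omega
    rw [List.foldl_cons, List.foldl_cons, hx, ih]

lemma dropWhile_head_false {α : Type} (p : α → Bool) :
    ∀ (l : List α) {r : α} {rs : List α}, l.dropWhile p = r :: rs → p r = false := by
  intro l
  induction l with
  | nil => intro r rs h; simp at h
  | cons a t ih =>
    intro r rs h
    rw [List.dropWhile_cons] at h
    split_ifs at h with hp
    · exact ih h
    · cases h
      simpa using hp

lemma bGroup_aux (k : Int) :
    ∀ (n : Nat) (l : List Int), l.length ≤ n → l.Pairwise (· ≤ ·) →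
      bGroup k l = (cardSat l k : Int) := by
  intro n
  induction n with
  | zero =>
    intro l hl _
    have : l = [] := List.eq_nil_of_length_eq_zero (Nat.le_zero.mp hl)
    subst this
    simp [bGroup, cardSat]
  | succ n ih =>
    intro l hl hp
    match l with
    | [] => simp [bGroup, cardSat]
    | x :: xs =>
      rw [bGroup]
      have hxs : xs = xs.takeWhile (fun y => y == x) ++ xs.dropWhile (fun y => y == x) :=
        List.takeWhile_append_dropWhile.symm
      set run := xs.takeWhile (fun y => y == x) with hrundef
      set rest := xs.dropWhile (fun y => y == x) with hrestdef
      have hrun : ∀ y ∈ run, y = x := fun y hy => by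
        simpa using List.mem_takeWhile_imp hy
      have hxle : ∀ z ∈ xs, x ≤ z := (List.pairwise_cons.mp hp).1
      have hxs_pw : xs.Pairwise (· ≤ ·) := (List.pairwise_cons.mp hp).2
      have hrest_pw : rest.Pairwise (· ≤ ·) :=
        hxs_pw.sublist (List.dropWhile_sublist _)
      have hrest_gt : ∀ y ∈ rest, x < y := by
        intro y hy
        cases hrc : rest with
        | nil => rw [hrc] at hy; simp at hy
        | cons r rs =>
          have hne : ((fun y => y == x) r) = false :=
            dropWhile_head_false (fun y => y == x) xs (hrestdef.symm.trans hrc)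
          have hrne : r ≠ x := by simpa using hne
          have hrxs : r ∈ xs := (List.dropWhile_sublist _).subset (hrc ▸ List.mem_cons_self)
          have hxr : x < r := lt_of_le_of_ne (hxle r hrxs) (Ne.symm hrne)
          rw [hrc] at hy
          rcases List.mem_cons.mp hy with h | h
          · exact h ▸ hxr
          · have : r ≤ y := (List.pairwise_cons.mp (hrc ▸ hrest_pw)).1 y h
            omega
      have hxnotin : x ∉ rest := fun h => lt_irrefl x (hrest_gt x h)
      have hcount_x : (x :: xs).count x = run.length + 1 := by
        rw [hxs]
        simp [List.count_append, List.count_eq_zero.mpr hxnotin,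
          List.count_eq_length.mpr (fun b hb => (hrun b hb).symm)]
      have hcount_other : ∀ v, v ≠ x → (x :: xs).count v = rest.count v := by
        intro v hv
        rw [hxs]
        have hvrun : v ∉ run := fun hm => hv (hrun v hm)
        simp [List.count_cons, List.count_append, List.count_eq_zero.mpr hvrun]
        omega
      have htof : (x :: xs).toFinset = insert x rest.toFinset := by
        ext v
        rw [hxs]
        simp only [List.toFinset_cons, List.toFinset_append, Finset.mem_insert,
          Finset.mem_union, List.mem_toFinset]
        constructor
        · rintro (h | h | h)
          · exact Or.inl h
          · exact Or.inl (hrun v h)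
          · exact Or.inr h
        · rintro (h | h)
          · exact Or.inl h
          · exact Or.inr (Or.inr h)
      have hxnotS : x ∉ rest.toFinset := by simpa using hxnotin
      have hlen : rest.length ≤ n := by
        have h1 : rest.length ≤ xs.length := List.length_dropWhile_le _ _
        have h2 : (x :: xs).length = xs.length + 1 := rfl
        omega
      have ihrest := ih rest hlen hrest_pw
      have hcongr : Finset.filter (fun v => 1 ≤ v ∧ ((x :: xs).count v : Int) ≤ k) rest.toFinset
          = Finset.filter (fun v => 1 ≤ v ∧ (rest.count v : Int) ≤ k) rest.toFinset := by
        apply Finset.filter_congr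
        intro v hv
        have hvx : v ≠ x := fun he => hxnotS (he ▸ hv)
        rw [hcount_other v hvx]
      have hcard : cardSat (x :: xs) k
          = (if 1 ≤ x ∧ (((x :: xs).count x : Int) ≤ k) then 1 else 0) + cardSat rest k := by
        unfold cardSat
        rw [htof, Finset.filter_insert, hcongr]
        split_ifs with hpx
        · rw [Finset.card_insert_of_notMem
            (fun hmem => hxnotS (Finset.mem_of_mem_filter _ hmem))]
          omega
        · omega
      have hiff : (1 ≤ x ∧ (run.length : Int) + 1 ≤ k)
          ↔ (1 ≤ x ∧ (((x :: xs).count x : Int) ≤ k)) := by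
        rw [hcount_x]
        push_cast
        tauto
      rw [ihrest, hcard]
      by_cases hc : 1 ≤ x ∧ (run.length : Int) + 1 ≤ k
      · rw [if_pos hc, if_pos (hiff.mp hc)]
        push_cast
        ring
      · rw [if_neg hc, if_neg (fun h => hc (hiff.mpr h))]
        push_cast
        ring

lemma bGroup_eq_cardSat (k : Int) (l : List Int) (hs : l.Pairwise (· ≤ ·)) :
    bGroup k l = (cardSat l k : Int) :=
  bGroup_aux k l.length l le_rfl hs

lemma countP_range_eq_cardSat (M : List Int) (k : Int) :
    (PySem.List.pyRange 1 (M.foldl max 0 + 1)).countP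
        (fun t => decide (t ∈ M ∧ (M.count t : Int) ≤ k))
      = cardSat M k := by
  have hnd : (PySem.List.pyRange 1 (M.foldl max 0 + 1)).Nodup :=
    PySem.List.nodup_pyRange_one _ _
  rw [List.countP_eq_length_filter, ← List.toFinset_card_of_nodup (hnd.filter _)]
  unfold cardSat
  congr 1
  ext v
  simp only [List.mem_toFinset, List.mem_filter, Finset.mem_filter, decide_eq_true_eq,
    PySem.List.mem_pyRange_one]
  constructor
  · rintro ⟨⟨h1, _⟩, hm, hc⟩
    exact ⟨hm, h1, hc⟩
  · rintro ⟨hm, h1, hc⟩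
    have hle := (PySem.List.le_foldl_max M 0).2 v hm
    exact ⟨⟨h1, by omega⟩, hm, hc⟩

lemma cardSat_perm {M N : List Int} (h : M.Perm N) (k : Int) : cardSat M k = cardSat N k := by
  unfold cardSat
  rw [List.toFinset_eq_of_perm _ _ h]
  congr 1
  apply Finset.filter_congr
  intro v _
  rw [h.count_eq v]

lemma a_eq (k : Int) (table : List String) :
    sleight_hand k table = (cardSat (digitsOf table) k : Int) := by
  simp only [sleight_hand]
  rw [foldl_table]
  obtain ⟨h1, h2, h3⟩ := foldl_gStep_inv (digitsOf table) PySem.Dict.empty 0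
  rw [h3, foldl_maxstep_eq, PySem.List.foldl_ite_add_one]
  have hq : ((PySem.List.pyRange 1 ((digitsOf table).foldl max 0 + 1)).countP
      (fun t => decide ((((digitsOf table).foldl gStep (PySem.Dict.empty, 0)).1.contains t : Prop)
        ∧ ((digitsOf table).foldl gStep (PySem.Dict.empty, 0)).1.getD t 0 ≤ k)))
      = ((PySem.List.pyRange 1 ((digitsOf table).foldl max 0 + 1)).countP
        (fun t => decide (t ∈ digitsOf table ∧ ((digitsOf table).count t : Int) ≤ k))) := by
    apply List.countP_congr
    intro t _
    simp [h1 t, h2 t, PySem.Dict.contains_empty, PySem.Dict.getD_empty]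
  rw [hq, countP_range_eq_cardSat]
  simp

lemma alt_eq (k : Int) (table : List String) :
    sleight_hand_alt k table = (cardSat (digitsOf table) k : Int) := by
  show bGroup k (PySem.List.sorted (digitsOf table) (fun x => x) false)
      = (cardSat (digitsOf table) k : Int)
  have hpw : (PySem.List.sorted (digitsOf table) (fun x => x) false).Pairwise (· ≤ ·) := by
    simpa using PySem.List.sorted_pairwise (digitsOf table) (fun x => x)
  rw [bGroup_eq_cardSat k _ hpw,
    cardSat_perm (PySem.List.sorted_perm (digitsOf table) (fun x => x) false) k]

-- ===== VERDICT (by name: the statement is the Claim_ definition above) =====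
theorem sleight_hand_spec : Claim_equal_sleight_hand := by
  intro k table _
  unfold Spec_sleight_hand
  rw [a_eq, alt_eq]
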